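-- pv_equiv track=rewrite | github.com/trombasso/Obligs-UiT-21-22 | 2021H/Oblig 3/O3_anagram.1.0.1.py | string_to_sorted_ordlist
-- ===== SOURCE A (Python) =====
-- def string_to_sorted_ordlist(string):
--     string = list(string)
--     for i in range(0, len(string)):
--         string[i] = ord(string[i])
--
--     for x in range(len(string) - 1):
--         current_min = min(string[x:])
--         current_min_index = x + string[x:].index(current_min)
--
--         if current_min_index != x:
--             string[current_min_index], string[x] = string[x], current_min
--     return string
-- ===== SOURCE B (Python) =====
-- def string_to_sorted_ordlist(string):
--     out = []
--     for ch in string: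
--         v = ord(ch)
--         i = len(out)
--         while i > 0 and out[i - 1] > v:
--             i -= 1
--         out.insert(i, v)
--     return out
-- ===== Notes on version B (the rewrite author's own statement) =====
-- stated objective: alternative
-- what changed: Replaces A's selection sort (repeated min over a full slice copy plus a separate index scan and a conditional swap) with an insertion sort that keeps the output list sorted and, for each ordinal, scans that list from the right for its insertion point.
import Mathlib
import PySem

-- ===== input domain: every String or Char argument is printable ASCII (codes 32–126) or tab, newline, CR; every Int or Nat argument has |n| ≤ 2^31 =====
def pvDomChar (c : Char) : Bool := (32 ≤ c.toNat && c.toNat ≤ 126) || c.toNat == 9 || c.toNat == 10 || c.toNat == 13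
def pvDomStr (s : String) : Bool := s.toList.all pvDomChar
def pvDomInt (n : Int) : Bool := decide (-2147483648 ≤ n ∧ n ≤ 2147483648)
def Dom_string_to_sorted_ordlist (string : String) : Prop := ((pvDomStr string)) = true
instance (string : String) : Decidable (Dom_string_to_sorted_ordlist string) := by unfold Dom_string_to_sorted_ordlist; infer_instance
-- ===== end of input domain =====

-- B replaces A's selection sort (min over a slice + index scan + swap per position)
-- with an insertion sort that scans the sorted output from the right; same outputs, similar cost.


-- ===== PORT A =====
-- one pass of A's inner loop body at index x: current_min / current_min_index / conditional swap
def selStep (l : List Int) (x : Int) : List Int :=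
  match PySem.List.min? (PySem.List.slice l (some x) none) (fun y => y) with
  | none => l          -- unreachable: the slice is nonempty for every x the loop visits
  | some m =>
    match PySem.List.index? (PySem.List.slice l (some x) none) m with
    | none => l        -- unreachable: m is an element of the slice
    | some j =>
      let i : Int := x + (j : Int)
      if i ≠ x then
        PySem.List.pySetD (PySem.List.pySetD l i (PySem.List.pyGetD l x 0)) x m
      else l

def string_to_sorted_ordlist (string : String) : List Int :=
  let l := string.toList.map (fun c => (c.toNat : Int))
  (PySem.List.pyRange 0 ((l.length : Int) - 1) 1).foldl selStep l

-- ===== PORT B =====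
-- Source B's inner while loop starts at i = len(out) and decrements i while out[i-1] > v;
-- this recursion on i performs exactly that downward scan and returns the final i.
def insDownFrom (out : List Int) (v : Int) : Nat → Nat
  | 0 => 0
  | i + 1 => if v < PySem.List.pyGetD out ((i : Nat) : Int) 0 then insDownFrom out v i else i + 1

def string_to_sorted_ordlist_alt (string : String) : List Int :=
  string.toList.foldl
    (fun out c =>
      PySem.List.insert out ((insDownFrom out (c.toNat : Int) out.length : Nat) : Int)
        (c.toNat : Int))
    []

-- ===== PRECONDITION & SPEC =====
def Spec_string_to_sorted_ordlist (string : String) (out : List Int) : Prop := out = string_to_sorted_ordlist_alt string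
instance (string : String) (out : List Int) : Decidable (Spec_string_to_sorted_ordlist string out) := by unfold Spec_string_to_sorted_ordlist; infer_instance

-- ===== CLAIM (what is proved, stated in full; the proofs are below) =====
def Claim_equal_string_to_sorted_ordlist : Prop := ∀ (string : String), Dom_string_to_sorted_ordlist string → Spec_string_to_sorted_ordlist string (string_to_sorted_ordlist string)

-- ===== LEMMAS AND PROOFS =====

-- B side ---------------------------------------------------------------
lemma insDownFrom_succ (out : List Int) (v : Int) (i : Nat) :
    insDownFrom out v (i + 1) = if v < out.getD i 0 then insDownFrom out v i else i + 1 := by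
  rw [insDownFrom, PySem.List.pyGetD_natCast]

lemma insDown_le (out : List Int) (v : Int) : ∀ i, insDownFrom out v i ≤ i := by
  intro i
  induction i with
  | zero => simp [insDownFrom]
  | succ i ih =>
    rw [insDownFrom_succ]
    split_ifs
    · omega
    · omega

lemma insDown_gt (out : List Int) (v : Int) :
    ∀ i, ∀ j, insDownFrom out v i ≤ j → j < i → v < out.getD j 0 := by
  intro i
  induction i with
  | zero => omega
  | succ i ih =>
    intro j h1 h2
    rw [insDownFrom_succ] at h1
    by_cases hc : v < out.getD i 0
    · rw [if_pos hc] at h1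
      rcases Nat.lt_succ_iff_lt_or_eq.mp h2 with h2' | rfl
      · exact ih j h1 h2'
      · exact hc
    · rw [if_neg hc] at h1
      omega

lemma insDown_last (out : List Int) (v : Int) (i : Nat) :
    insDownFrom out v i = 0 ∨ out.getD (insDownFrom out v i - 1) 0 ≤ v := by
  induction i with
  | zero => simp [insDownFrom]
  | succ i ih =>
    rw [insDownFrom_succ]
    by_cases hc : v < out.getD i 0
    · rw [if_pos hc]
      exact ih
    · rw [if_neg hc]
      right
      simpa using le_of_not_gt hc

lemma insStep_perm (acc : List Int) (v : Int) :
    (PySem.List.insert acc ((insDownFrom acc v acc.length : Nat) : Int) v).Perm (v :: acc) := by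
  rw [PySem.List.insert_natCast acc _ v (insDown_le acc v acc.length)]
  exact List.perm_middle.trans (by rw [List.take_append_drop])

lemma insStep_sorted (acc : List Int) (v : Int) (hs : acc.Pairwise (· ≤ ·)) :
    (PySem.List.insert acc ((insDownFrom acc v acc.length : Nat) : Int) v).Pairwise (· ≤ ·) := by
  have hij := List.pairwise_iff_getElem.mp hs
  set p := insDownFrom acc v acc.length with hp
  have hple : p ≤ acc.length := insDown_le acc v acc.length
  have hB : ∀ b ∈ acc.drop p, v ≤ b := by
    intro b hb
    obtain ⟨t, ht, rfl⟩ := List.mem_iff_getElem.mp hb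
    rw [List.getElem_drop]
    have hlt : p + t < acc.length := by simp at ht; omega
    have := insDown_gt acc v acc.length (p + t) (by omega) hlt
    rw [List.getD_eq_getElem acc 0 hlt] at this
    exact le_of_lt this
  have hA : ∀ a ∈ acc.take p, a ≤ v := by
    intro a ha
    obtain ⟨j, hj, rfl⟩ := List.mem_iff_getElem.mp ha
    have hjp : j < p ∧ j < acc.length := by simpa using hj
    have hp0 : p ≠ 0 := by omega
    rcases insDown_last acc v acc.length with h0 | hlast
    · exact absurd (hp.trans h0) hp0
    · rw [List.getD_eq_getElem acc 0 (by omega : p - 1 < acc.length)] at hlast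
      rw [List.getElem_take]
      rcases Nat.lt_or_ge j (p - 1) with hj' | hj'
      · exact le_trans (hij j (p - 1) (by omega) (by omega) hj') hlast
      · have : j = p - 1 := by omega
        subst this
        exact hlast
  rw [PySem.List.insert_natCast acc _ v hple]
  refine List.pairwise_append.mpr ⟨hs.sublist (List.take_sublist p acc), ?_, ?_⟩
  · exact List.pairwise_cons.mpr ⟨hB, hs.sublist (List.drop_sublist p acc)⟩
  · intro a ha b hb
    rcases List.mem_cons.mp hb with rfl | hb'
    · exact hA a ha
    · exact le_trans (hA a ha) (hB b hb')

lemma foldB_spec (l acc : List Int) (hs : acc.Pairwise (· ≤ ·)) :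
    (l.foldl (fun out v =>
        PySem.List.insert out ((insDownFrom out v out.length : Nat) : Int) v) acc).Perm (l ++ acc) ∧
    (l.foldl (fun out v =>
        PySem.List.insert out ((insDownFrom out v out.length : Nat) : Int) v) acc).Pairwise (· ≤ ·) := by
  induction l generalizing acc with
  | nil => exact ⟨by simp, hs⟩
  | cons v t ih =>
    obtain ⟨hperm, hsr⟩ := ih _ (insStep_sorted acc v hs)
    refine ⟨?_, hsr⟩
    simp only [List.foldl_cons]
    exact hperm.trans ((List.Perm.append_left t (insStep_perm acc v)).trans List.perm_middle)

-- A side ---------------------------------------------------------------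
lemma swap_cons_perm (l : List Int) (k : Nat) (hk : k < l.length) (b : Int) :
    (l[k] :: l.set k b).Perm (b :: l) := by
  induction l generalizing k with
  | nil => simp at hk
  | cons c t ih =>
    cases k with
    | zero => simpa using List.Perm.swap b c t
    | succ k =>
      have hk' : k < t.length := by simpa using hk
      have h1 : ((c :: t)[k+1] :: (c :: t).set (k+1) b) = t[k] :: c :: t.set k b := by simp
      rw [h1]
      exact ((List.Perm.swap c t[k] (t.set k b)).trans (((ih k hk').cons c))).trans
        (List.Perm.swap b c t)

-- one execution of the loop body: it brings some minimum m of the tail to the front,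
-- leaving a permutation of the tail behind it
lemma selStep_eq (pre : List Int) (r0 : Int) (rt : List Int) :
    ∃ m rest', (m :: rest').Perm (r0 :: rt) ∧ rest'.length = rt.length ∧
      (∀ y ∈ r0 :: rt, m ≤ y) ∧ m ∈ (r0 :: rt) ∧
      selStep (pre ++ r0 :: rt) (pre.length : Int) = pre ++ m :: rest' := by
  have h1 : PySem.List.slice (pre ++ r0 :: rt) (some (pre.length : Int)) none = r0 :: rt := by
    rw [PySem.List.slice_from_natCast]; simp
  obtain ⟨m, hm⟩ : ∃ m, PySem.List.min? (r0 :: rt) (fun y => y) = some m := by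
    cases h : PySem.List.min? (r0 :: rt) (fun y => y) with
    | none => exact absurd ((PySem.List.min?_eq_none_iff _ _).mp h) (by simp)
    | some m => exact ⟨m, rfl⟩
  have hmem : m ∈ r0 :: rt := PySem.List.min?_mem hm
  have hmin : ∀ y ∈ r0 :: rt, m ≤ y := PySem.List.min?_isMin hm
  obtain ⟨j, hj⟩ : ∃ j, PySem.List.index? (r0 :: rt) m = some j := by
    have := (PySem.List.index?_isSome_iff (r0 :: rt) m).mpr hmem
    exact Option.isSome_iff_exists.mp this
  obtain ⟨hjlt, hjm, -⟩ := PySem.List.getElem_of_index?_eq_some hj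
  cases j with
  | zero =>
    refine ⟨m, rt, by rw [← hjm]; simp, rfl, hmin, hmem, ?_⟩
    simp only [selStep, h1, hm, hj]
    rw [← hjm]
    simp
  | succ k =>
    have hk : k < rt.length := by simpa using hjlt
    have hrm : rt[k] = m := by simpa using hjm
    refine ⟨m, rt.set k r0, ?_, by simp, hmin, hmem, ?_⟩
    · have := swap_cons_perm rt k hk r0
      rwa [hrm] at this
    · simp only [selStep, h1, hm, hj]
      have hne : (pre.length : Int) + ((k + 1 : Nat) : Int) ≠ (pre.length : Int) := by
        push_cast; omega
      simp only [hne, if_pos, ne_eq, not_false_eq_true]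
      have hget : PySem.List.pyGetD (pre ++ r0 :: rt) ((pre.length : Nat) : Int) 0 = r0 := by
        rw [PySem.List.pyGetD_natCast]
        simp [List.getD]
      have hcast : (pre.length : Int) + ((k + 1 : Nat) : Int)
          = ((pre.length + (k + 1) : Nat) : Int) := by push_cast; ring
      rw [hget, hcast, PySem.List.pySetD_natCast, PySem.List.pySetD_natCast]
      rw [List.set_append, if_neg (by omega)]
      have e : pre.length + (k + 1) - pre.length = k + 1 := by omega
      rw [e, List.set_append, if_neg (by omega)]
      simp

-- the selection-sort fold, from a sorted prefix `pre` already below the rest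
lemma selFold_spec : ∀ (n : Nat) (rest pre : List Int), rest.length = n →
    pre.Pairwise (· ≤ ·) → (∀ a ∈ pre, ∀ b ∈ rest, a ≤ b) →
    ((PySem.List.pyRange (pre.length : Int) (((pre ++ rest).length : Int) - 1) 1).foldl
        selStep (pre ++ rest)).Perm (pre ++ rest) ∧
    ((PySem.List.pyRange (pre.length : Int) (((pre ++ rest).length : Int) - 1) 1).foldl
        selStep (pre ++ rest)).Pairwise (· ≤ ·) := by
  intro n
  induction n with
  | zero =>
    intro rest pre hlen hpre hrel
    have hrest : rest = [] := List.length_eq_zero_iff.mp hlen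
    subst hrest
    rw [PySem.List.pyRange_one_eq_nil (by simp)]
    exact ⟨by simp, by simpa using hpre⟩
  | succ n ih =>
    intro rest pre hlen hpre hrel
    obtain ⟨r0, rt, rfl⟩ : ∃ r0 rt, rest = r0 :: rt := by
      cases rest with
      | nil => simp at hlen
      | cons a t => exact ⟨a, t, rfl⟩
    have hrt : rt.length = n := by simpa using hlen
    cases n with
    | zero =>
      have hrt0 : rt = [] := List.length_eq_zero_iff.mp hrt
      subst hrt0
      rw [PySem.List.pyRange_one_eq_nil (by simp)]
      refine ⟨by simp, ?_⟩
      refine List.pairwise_append.mpr ⟨hpre, by simp, ?_⟩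
      intro a ha b hb
      exact hrel a ha b hb
    | succ k =>
      rw [PySem.List.pyRange_one_cons
        (by simp only [List.length_append, List.length_cons]; push_cast; omega), List.foldl_cons]
      obtain ⟨m, rest', hperm, hlen', hmin, hmem, hstep⟩ := selStep_eq pre r0 rt
      rw [hstep]
      have hsub : ∀ b ∈ rest', b ∈ r0 :: rt := fun b hb => hperm.subset (List.mem_cons_of_mem m hb)
      have hpre' : (pre ++ [m]).Pairwise (· ≤ ·) := by
        refine List.pairwise_append.mpr ⟨hpre, by simp, ?_⟩
        intro a ha b hb
        rw [List.mem_singleton.mp hb]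
        exact hrel a ha m hmem
      have hrel' : ∀ a ∈ pre ++ [m], ∀ b ∈ rest', a ≤ b := by
        intro a ha b hb
        rcases List.mem_append.mp ha with ha' | ha'
        · exact hrel a ha' b (hsub b hb)
        · rw [List.mem_singleton.mp ha']
          exact hmin b (hsub b hb)
      have hIH := ih rest' (pre ++ [m]) (hlen'.trans hrt) hpre' hrel'
      have e1 : ((pre ++ [m]).length : Int) = (pre.length : Int) + 1 := by simp
      have e2 : (pre ++ [m]) ++ rest' = pre ++ m :: rest' := by simp
      have e3 : (((pre ++ [m]) ++ rest').length : Int) = ((pre ++ r0 :: rt).length : Int) := by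
        simp [hlen']
      rw [e1, e3, e2] at hIH
      refine ⟨hIH.1.trans ?_, hIH.2⟩
      exact List.Perm.append_left pre hperm

-- characterisation of each port -----------------------------------------
lemma portA_eq_sorted (s : String) :
    string_to_sorted_ordlist s
      = PySem.List.sorted (s.toList.map (fun c => (c.toNat : Int))) (fun y => y) false := by
  have h := selFold_spec (s.toList.map (fun c => (c.toNat : Int))).length
    (s.toList.map (fun c => (c.toNat : Int))) [] rfl (by simp) (by simp)
  simp only [List.nil_append, List.length_nil, Nat.cast_zero] at h
  exact (PySem.List.sorted_id_eq_of_perm_of_pairwise _ _ h.1 h.2).symm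

lemma portB_eq_sorted (s : String) :
    string_to_sorted_ordlist_alt s
      = PySem.List.sorted (s.toList.map (fun c => (c.toNat : Int))) (fun y => y) false := by
  have h := foldB_spec (s.toList.map (fun c => (c.toNat : Int))) [] (by simp)
  rw [List.foldl_map] at h
  simp only [List.append_nil] at h
  exact (PySem.List.sorted_id_eq_of_perm_of_pairwise _ _ h.1 h.2).symm

-- ===== VERDICT (by name: the statement is the Claim_ definition above) =====
theorem string_to_sorted_ordlist_spec : Claim_equal_string_to_sorted_ordlist := by
  intro s _
  unfold Spec_string_to_sorted_ordlist
  rw [portA_eq_sorted, portB_eq_sorted]
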